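-- pv_equiv track=rewrite | github.com/aAT0047/Autosvp | SIMULATION/usingtools.py | find_middle_reads
-- ===== SOURCE A (Python) =====
-- def find_middle_reads(my_dict, first_index, last_index):
--     keys_with_value_1 = [key for key, value in my_dict.items() if value == [first_index]]
--
--     for start_key in keys_with_value_1:
--         current_key = start_key
--         for i in range(first_index+1, last_index+1):
--             current_key += 1
--             if my_dict.get(current_key) != [i]:
--                 break
--         else:
--             keys_range = list(range(start_key, current_key + 1))
--             return {key: my_dict[key] for key in keys_range}
-- ===== SOURCE B (Python) =====
-- def find_middle_reads(my_dict, first_index, last_index):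
--     # Count, in one pass, how many entries of my_dict fit each candidate run start:
--     # an entry (key, [v]) supports start = key - (v - first_index) when 0 <= v - first_index < n.
--     n = last_index - first_index + 1
--     if n < 1:
--         n = 1
--     starts = [key - (value[0] - first_index)
--               for key, value in my_dict.items()
--               if len(value) == 1 and 0 <= value[0] - first_index < n]
--     cnt = {}
--     for s in starts:
--         cnt[s] = cnt.get(s, 0) + 1
--     for key, value in my_dict.items():
--         if value == [first_index] and cnt.get(key, 0) == n:
--             return {k: my_dict[k] for k in range(key, key + n)}
--     return None
-- ===== Notes on version B (the rewrite author's own statement) =====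
-- stated objective: alternative
-- what changed: Instead of re-scanning the run from scratch for every candidate start key (nested loops), B makes one counting pass that credits each singleton entry [first_index+j] at key s+j to its implied start s, then accepts the first key in insertion order whose value is [first_index] and whose credit count equals the run length; this trades A's O(k*m) worst case for a guaranteed single pass, at a constant-factor cost on inputs with few or short runs.
import Mathlib
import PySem

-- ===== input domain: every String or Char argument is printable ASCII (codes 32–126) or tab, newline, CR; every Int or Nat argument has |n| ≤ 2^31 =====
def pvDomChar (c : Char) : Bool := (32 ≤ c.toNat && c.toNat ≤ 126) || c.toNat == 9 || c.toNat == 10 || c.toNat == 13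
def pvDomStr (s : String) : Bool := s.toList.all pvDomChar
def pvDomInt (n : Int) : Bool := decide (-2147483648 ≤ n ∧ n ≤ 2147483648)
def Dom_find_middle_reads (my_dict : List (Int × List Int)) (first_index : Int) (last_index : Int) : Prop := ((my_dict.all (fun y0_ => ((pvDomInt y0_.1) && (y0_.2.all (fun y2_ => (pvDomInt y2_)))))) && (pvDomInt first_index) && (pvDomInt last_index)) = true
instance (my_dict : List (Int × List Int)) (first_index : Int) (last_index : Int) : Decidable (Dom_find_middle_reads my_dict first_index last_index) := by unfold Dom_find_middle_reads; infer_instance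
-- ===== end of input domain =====

-- B replaces A's per-candidate rescans by one counting pass over the dict (each singleton
-- entry [first_index+j] at key s+j is credited to start s), then one dict lookup per candidate.

-- ===== PORT A =====
-- inner 'for i in range(first_index+1, last_index+1)' loop: returns the final current_key on
-- normal exit (the for-else branch), none on break; the range object is iterated lazily
def pvInnerA (d : PySem.Dict Int (List Int)) (b i current_key : Int) : Option Int :=
  if i < b then
    if d.get? (current_key + 1) ≠ some [i] then none
    else pvInnerA d b (i + 1) (current_key + 1)
  else some current_key
termination_by (b - i).toNat
decreasing_by omega

-- outer 'for start_key in keys_with_value_1' loop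
def pvOuterA (d : PySem.Dict Int (List Int)) (a b : Int) : List Int → Option (List (Int × List Int))
  | [] => none
  | start_key :: rest =>
      match pvInnerA d b a start_key with
      | some current_key =>
          -- {key: my_dict[key] for key in keys_range}; every key of the range is
          -- provably present in the dict on this path, so getD [] is exact here
          some ((PySem.List.pyRange start_key (current_key + 1) 1).map
            (fun k => (k, (d.get? k).getD [])))
      | none => pvOuterA d a b rest

def find_middle_reads (my_dict : List (Int × List Int)) (first_index : Int) (last_index : Int) : Option (List (Int × List Int)) :=
  let d := PySem.Dict.ofList my_dict
  let keys_with_value_1 := (d.items.filter (fun p => p.2 == [first_index])).map (·.1)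
  pvOuterA d (first_index + 1) (last_index + 1) keys_with_value_1

-- ===== PORT B =====
-- 'for key, value in my_dict.items(): if value == [first_index] and cnt.get(key, 0) == n: return …'
def pvScanB (d : PySem.Dict Int (List Int)) (first_index n : Int) (cnt : PySem.Dict Int Int) :
    List (Int × List Int) → Option (List (Int × List Int))
  | [] => none
  | p :: rest =>
      if p.2 == [first_index] && cnt.getD p.1 0 == n then
        -- {k: my_dict[k] for k in range(key, key + n)}; keys provably present here
        some ((PySem.List.pyRange p.1 (p.1 + n) 1).map (fun k => (k, (d.get? k).getD [])))
      else pvScanB d first_index n cnt rest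

def find_middle_reads_alt (my_dict : List (Int × List Int)) (first_index : Int) (last_index : Int) : Option (List (Int × List Int)) :=
  let d := PySem.Dict.ofList my_dict
  let n : Int := if last_index - first_index + 1 < 1 then 1 else last_index - first_index + 1
  -- value[0] is guarded by len(value) == 1, so headD 0 is exact
  let starts := (d.items.filter (fun p =>
      p.2.length == 1 && decide (0 ≤ p.2.headD 0 - first_index) && decide (p.2.headD 0 - first_index < n))).map
      (fun p => p.1 - (p.2.headD 0 - first_index))
  let cnt := starts.foldl (fun c s => c.insert s (c.getD s 0 + 1)) PySem.Dict.empty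
  pvScanB d first_index n cnt d.items

-- ===== PRECONDITION & SPEC =====
def Spec_find_middle_reads (my_dict : List (Int × List Int)) (first_index : Int) (last_index : Int) (out : Option (List (Int × List Int))) : Prop := out = find_middle_reads_alt my_dict first_index last_index
instance (my_dict : List (Int × List Int)) (first_index : Int) (last_index : Int) (out : Option (List (Int × List Int))) : Decidable (Spec_find_middle_reads my_dict first_index last_index out) := by unfold Spec_find_middle_reads; infer_instance

-- ===== CLAIM (what is proved, stated in full; the proofs are below) =====
def Claim_equal_find_middle_reads : Prop := ∀ (my_dict : List (Int × List Int)) (first_index : Int) (last_index : Int), Dom_find_middle_reads my_dict first_index last_index → Spec_find_middle_reads my_dict first_index last_index (find_middle_reads my_dict first_index last_index)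

-- ===== LEMMAS AND PROOFS =====

lemma pv_inner_eq_some (d : PySem.Dict Int (List Int)) (b : Int) :
    ∀ (M : Nat) (i ck c : Int), (b - i).toNat = M →
      (pvInnerA d b i ck = some c ↔
        (c = ck + (M : Int) ∧ ∀ t : Nat, t < M → d.get? (ck + (t : Int) + 1) = some [i + (t : Int)])) := by
  intro M
  induction M with
  | zero =>
      intro i ck c hM
      rw [pvInnerA, if_neg (by omega)]
      simp
      omega
  | succ M ih =>
      intro i ck c hM
      rw [pvInnerA, if_pos (by omega)]
      by_cases h : d.get? (ck + 1) = some [i]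
      · rw [if_neg (by simpa using h), ih (i + 1) (ck + 1) c (by omega)]
        constructor
        · rintro ⟨hc, hall⟩
          refine ⟨by omega, ?_⟩
          intro t ht
          cases t with
          | zero => simpa using h
          | succ t =>
              have := hall t (by omega)
              rw [show ck + ((t + 1 : Nat) : Int) + 1 = ck + 1 + (t : Int) + 1 by push_cast; ring,
                show i + ((t + 1 : Nat) : Int) = i + 1 + (t : Int) by push_cast; ring]
              exact this
        · rintro ⟨hc, hall⟩
          refine ⟨by omega, ?_⟩
          intro t ht
          have := hall (t + 1) (by omega)
          rw [show ck + ((t + 1 : Nat) : Int) + 1 = ck + 1 + (t : Int) + 1 by push_cast; ring,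
            show i + ((t + 1 : Nat) : Int) = i + 1 + (t : Int) by push_cast; ring] at this
          exact this
      · rw [if_pos (by simpa using h)]
        constructor
        · rintro ⟨⟩
        · rintro ⟨hc, hall⟩
          exact absurd (by simpa using hall 0 (by omega)) h

lemma pv_cnt_iff (d : PySem.Dict Int (List Int)) (hnd : d.keys.Nodup) (first n s : Int) (hn : 1 ≤ n) :
    (((d.items.filter (fun p =>
        p.2.length == 1 && decide (0 ≤ p.2.headD 0 - first) && decide (p.2.headD 0 - first < n))).map
        (fun p => p.1 - (p.2.headD 0 - first))).foldl
        (fun c x => c.insert x (c.getD x 0 + 1)) PySem.Dict.empty).getD s 0 = n ↔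
      ∀ j : Nat, j < n.toNat → d.get? (s + (j : Int)) = some [first + (j : Int)] := by
  have hitems : d.items.Nodup := hnd.of_map
  set N := n.toNat with hN
  set g : Nat → Int × List Int := fun j => (s + (j : Int), ([first + (j : Int)] : List Int)) with hg
  set S := (List.range N).map g with hSdef
  have hginj : Function.Injective g := by
    intro a b hab
    simp only [hg, Prod.mk.injEq] at hab
    omega
  have hS : S.Nodup := (List.nodup_range).map hginj
  have hSlen : S.length = N := by simp [hSdef]
  rw [PySem.Dict.getD_foldl_insert_add_one, PySem.Dict.getD_empty, zero_add]
  rw [List.count, List.countP_map, List.countP_filter]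
  have hcongr : List.countP
      (fun a =>
        ((fun x => x == s) ∘ fun p => p.1 - (p.2.headD 0 - first)) a &&
          (a.2.length == 1 && decide (0 ≤ a.2.headD 0 - first) && decide (a.2.headD 0 - first < n)))
      d.items = d.items.countP (fun p => decide (p ∈ S)) := by
    apply List.countP_congr
    intro p _
    simp only [Function.comp, Bool.and_eq_true, beq_iff_eq, decide_eq_true_eq,
      hSdef, List.mem_map, List.mem_range, hg]
    constructor
    · rintro ⟨h1, ⟨h2, h3⟩, h4⟩
      obtain ⟨v, hv⟩ : ∃ v, p.2 = [v] := by
        cases hp2 : p.2 with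
        | nil => simp [hp2] at h2
        | cons a t => cases t with
          | nil => exact ⟨a, rfl⟩
          | cons b u => simp [hp2] at h2
      rw [hv] at h1 h3 h4; simp at h1 h3 h4
      refine ⟨(v - first).toNat, by omega, ?_⟩
      have hc : ((v - first).toNat : Int) = v - first := by omega
      have : p = (p.1, p.2) := rfl
      rw [this, hv]
      simp [hc]
      omega
    · rintro ⟨j, hj, rfl⟩
      simp
      omega
  rw [hcongr, List.countP_eq_length_filter]
  have hperm : (d.items.filter (fun p => decide (p ∈ S))).Perm
      (S.filter (fun x => decide (x ∈ d.items))) := by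
    refine (List.perm_ext_iff_of_nodup (hitems.filter _) (hS.filter _)).2 ?_
    intro a; simp; tauto
  rw [hperm.length_eq]
  constructor
  · intro h j hj
    have hlen : List.countP (fun x => decide (x ∈ d.items)) S = S.length := by
      rw [List.countP_eq_length_filter, hSlen]; omega
    have hall := List.countP_eq_length.mp hlen
    have := hall (g j) (by rw [hSdef]; exact List.mem_map.2 ⟨j, List.mem_range.2 hj, rfl⟩)
    simp only [decide_eq_true_eq] at this
    exact (PySem.Dict.get?_eq_some_iff_mem_items d _ _ hnd).2 this
  · intro h
    have heq : S.filter (fun x => decide (x ∈ d.items)) = S := by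
      apply List.filter_eq_self.2
      intro x hx
      rw [hSdef] at hx
      obtain ⟨j, hj, rfl⟩ := List.mem_map.1 hx
      rw [List.mem_range] at hj
      simpa using (PySem.Dict.get?_eq_some_iff_mem_items d _ _ hnd).1 (h j hj)
    rw [heq, hSlen]; omega

lemma pv_scan_eq (d : PySem.Dict Int (List Int)) (hnd : d.keys.Nodup)
    (first last n : Int) (hn1 : 1 ≤ n)
    (hnl : n = ((last - first).toNat : Int) + 1)
    (cnt : PySem.Dict Int Int)
    (hcnt : ∀ s : Int, cnt.getD s 0 = n ↔
      ∀ j : Nat, j < n.toNat → d.get? (s + (j : Int)) = some [first + (j : Int)]) :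
    ∀ l : List (Int × List Int), (∀ p ∈ l, p ∈ d.items) →
      pvOuterA d (first + 1) (last + 1) ((l.filter (fun p => p.2 == [first])).map (·.1))
        = pvScanB d first n cnt l := by
  intro l
  induction l with
  | nil => intro _; simp [pvOuterA, pvScanB]
  | cons p rest ih =>
      intro hl
      have hrest : ∀ q ∈ rest, q ∈ d.items := fun q hq => hl q (List.mem_cons_of_mem _ hq)
      by_cases hv : p.2 = [first]
      · have hp : (p.1, [first]) ∈ d.items := by rw [← hv]; exact hl p (List.mem_cons_self ..)
        have h0 : d.get? p.1 = some [first] := PySem.Dict.get?_of_mem_items d hp hnd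
        set M : Nat := (last - first).toNat with hM
        have hMfuel : ((last + 1) - (first + 1)).toNat = M := by omega
        have hCOND : (∀ j : Nat, j < n.toNat → d.get? (p.1 + (j : Int)) = some [first + (j : Int)]) ↔
            (∀ t : Nat, t < M → d.get? (p.1 + (t : Int) + 1) = some [(first + 1) + (t : Int)]) := by
          constructor
          · intro hc t ht
            have := hc (t + 1) (by omega)
            rw [show p.1 + ((t + 1 : Nat) : Int) = p.1 + (t : Int) + 1 by push_cast; ring,
              show first + ((t + 1 : Nat) : Int) = first + 1 + (t : Int) by push_cast; ring] at this
            exact this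
          · intro hc j hj
            cases j with
            | zero => simpa using h0
            | succ t =>
                have := hc t (by omega)
                rw [show p.1 + ((t + 1 : Nat) : Int) = p.1 + (t : Int) + 1 by push_cast; ring,
                  show first + ((t + 1 : Nat) : Int) = first + 1 + (t : Int) by push_cast; ring]
                exact this
        have hfilter : ((p :: rest).filter (fun p => p.2 == [first])).map (·.1)
            = p.1 :: (rest.filter (fun p => p.2 == [first])).map (·.1) := by
          simp [hv]
        rw [hfilter]
        by_cases hC : ∀ j : Nat, j < n.toNat → d.get? (p.1 + (j : Int)) = some [first + (j : Int)]
        · have hinner : pvInnerA d (last + 1) (first + 1) p.1 = some (p.1 + (M : Int)) :=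
            (pv_inner_eq_some d (last + 1) M (first + 1) p.1 _ hMfuel).2 ⟨rfl, hCOND.1 hC⟩
          have hcnteq : cnt.getD p.1 0 = n := (hcnt p.1).2 hC
          simp only [pvOuterA, hinner, pvScanB, hv, hcnteq, beq_self_eq_true, Bool.and_self, if_true]
          rw [show p.1 + (M : Int) + 1 = p.1 + n by omega]
        · have hinner : pvInnerA d (last + 1) (first + 1) p.1 = none := by
            cases hi : pvInnerA d (last + 1) (first + 1) p.1 with
            | none => rfl
            | some c =>
                exact absurd (hCOND.2 ((pv_inner_eq_some d (last + 1) M (first + 1) p.1 c hMfuel).1 hi).2) hC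
          have hcnne : ¬ cnt.getD p.1 0 = n := fun hh => hC ((hcnt p.1).1 hh)
          simp only [pvOuterA, hinner, pvScanB, hv, beq_self_eq_true, Bool.true_and]
          rw [if_neg (by simpa using hcnne)]
          exact ih hrest
      · have hfilter : ((p :: rest).filter (fun p => p.2 == [first])).map (·.1)
            = (rest.filter (fun p => p.2 == [first])).map (·.1) := by
          simp [hv]
        rw [hfilter]
        have hfalse : (p.2 == [first] && cnt.getD p.1 0 == n) = false := by simp [hv]
        simp only [pvScanB, hfalse]
        exact ih hrest

-- ===== VERDICT (by name: the statement is the Claim_ definition above) =====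
theorem find_middle_reads_spec : Claim_equal_find_middle_reads := by
  intro my_dict first_index last_index _
  unfold Spec_find_middle_reads find_middle_reads find_middle_reads_alt
  have hnd := PySem.Dict.nodup_keys_ofList my_dict
  set n : Int := if last_index - first_index + 1 < 1 then 1 else last_index - first_index + 1 with hn
  have hn1 : 1 ≤ n := by rw [hn]; split_ifs <;> omega
  have hnl : n = ((last_index - first_index).toNat : Int) + 1 := by rw [hn]; split_ifs <;> omega
  exact pv_scan_eq (PySem.Dict.ofList my_dict) hnd first_index last_index n hn1 hnl _
    (fun s => pv_cnt_iff (PySem.Dict.ofList my_dict) hnd first_index n s hn1)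
    (PySem.Dict.ofList my_dict).items (fun p hp => hp)
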